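-- pv_equiv track=rewrite | github.com/VAO6/AnalisisNumerico | web_page/src/methods/gseidel.py | minus_triangular_lower
-- ===== SOURCE A (Python) =====
-- def minus_triangular_lower(matrix):
--     matrix_d = list()
--     for x in range(len(matrix)):
--         matrix_d.append(list())
--         for y in range(len(matrix)):
--             if x >= y:
--                 matrix_d[x].append(-matrix[x][y])
--             else:
--                 matrix_d[x].append(0)
--     return matrix_d
-- ===== SOURCE B (Python) =====
-- def minus_triangular_lower(matrix):
--     if not matrix:
--         return []
--     n = len(matrix)
--     rec = minus_triangular_lower([row[1:] for row in matrix[1:]])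
--     out = [[-matrix[0][0]] + [0] * (n - 1)]
--     for row, r in zip(matrix[1:], rec):
--         out.append([-row[0]] + r)
--     return out
-- ===== Notes on version B (the rewrite author's own statement) =====
-- stated objective: alternative
-- what changed: Replaces A's index-driven double loop with a divide-and-conquer recursion: peel the first row and first column, recurse on the trimmed submatrix, and rebuild each later row by prepending its negated first element to the recursive row.
import Mathlib
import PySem

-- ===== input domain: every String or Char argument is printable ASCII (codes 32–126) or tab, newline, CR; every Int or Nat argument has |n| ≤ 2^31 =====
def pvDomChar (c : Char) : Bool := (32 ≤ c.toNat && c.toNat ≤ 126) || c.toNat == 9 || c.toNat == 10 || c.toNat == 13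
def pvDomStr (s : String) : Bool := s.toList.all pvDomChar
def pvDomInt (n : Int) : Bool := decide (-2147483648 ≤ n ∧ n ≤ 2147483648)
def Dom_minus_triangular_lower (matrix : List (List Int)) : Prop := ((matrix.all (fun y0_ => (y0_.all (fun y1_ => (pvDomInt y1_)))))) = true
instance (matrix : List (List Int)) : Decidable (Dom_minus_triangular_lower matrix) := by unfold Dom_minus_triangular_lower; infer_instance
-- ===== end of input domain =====

-- B is a divide-and-conquer recursion (peel first row and first column, recurse on the
-- trimmed submatrix) instead of A's index-driven double loop (objective: alternative).

-- ===== PORT A =====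
def minus_triangular_lower (matrix : List (List Int)) : List (List Int) :=
  (PySem.List.pyRange 0 matrix.length 1).foldl
    (fun matrix_d x =>
      matrix_d ++
        [(PySem.List.pyRange 0 matrix.length 1).foldl
          (fun row y =>
            if x ≥ y then
              row ++ [-(PySem.List.pyGetD (PySem.List.pyGetD matrix x []) y 0)]
            else
              row ++ [(0 : Int)]) []]) []

-- ===== PORT B =====
def minus_triangular_lower_alt (matrix : List (List Int)) : List (List Int) :=
  match matrix with
  | [] => []
  | r0 :: rest =>
    -- rec = minus_triangular_lower([row[1:] for row in matrix[1:]])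
    let r := minus_triangular_lower_alt (rest.map (fun row => PySem.List.slice row (some 1) none))
    -- out = [[-matrix[0][0]] + [0]*(n-1)]; then append [-row[0]] + r for row, r in zip
    ((-(PySem.List.pyGetD r0 0 0)) :: List.replicate ((r0 :: rest).length - 1) (0 : Int)) ::
      List.zipWith (fun row rr => (-(PySem.List.pyGetD row 0 0)) :: rr) rest r
termination_by matrix.length
decreasing_by simp

-- ===== PRECONDITION & SPEC =====
-- Pre_ excludes ragged inputs where some row i is shorter than i+1: there the
-- Python A (and B alike) raises IndexError reading matrix[i][i].
def Pre_minus_triangular_lower (matrix : List (List Int)) : Prop :=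
  ∀ i ∈ List.range matrix.length, i < (matrix.getD i []).length
instance (matrix : List (List Int)) : Decidable (Pre_minus_triangular_lower matrix) := by
  unfold Pre_minus_triangular_lower; infer_instance
def pvWitness_minus_triangular_lower : List (List Int) := [[1], [2, -3], [4, 5, 6]]

def Spec_minus_triangular_lower (matrix : List (List Int)) (out : List (List Int)) : Prop := out = minus_triangular_lower_alt matrix
instance (matrix : List (List Int)) (out : List (List Int)) : Decidable (Spec_minus_triangular_lower matrix out) := by unfold Spec_minus_triangular_lower; infer_instance

-- ===== CLAIM (what is proved, stated in full; the proofs are below) =====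
def Claim_equal_minus_triangular_lower : Prop := ∀ (matrix : List (List Int)), Dom_minus_triangular_lower matrix → Pre_minus_triangular_lower matrix → Spec_minus_triangular_lower matrix (minus_triangular_lower matrix)

-- ===== LEMMAS AND PROOFS =====

-- Common normal form both ports are reduced to: row x is the negated prefix of
-- length x+1 followed by zeros.
def pvTgt (matrix : List (List Int)) : List (List Int) :=
  (List.range matrix.length).map
    (fun x =>
      ((List.range (x + 1)).map (fun y => -((matrix.getD x []).getD y 0)))
        ++ List.replicate (matrix.length - x - 1) (0 : Int))

lemma zipWith_map_range {α β γ : Type} (f : α → β → γ) (d : α) :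
    ∀ (l : List α) (g : Nat → β),
      List.zipWith f l ((List.range l.length).map g)
        = (List.range l.length).map (fun x => f (l.getD x d) (g x)) := by
  intro l
  induction l with
  | nil => intro g; simp
  | cons a l ih =>
    intro g
    simp only [List.length_cons, List.range_succ_eq_map, List.map_cons, List.zipWith_cons_cons,
      List.map_map, Function.comp_def]
    rw [ih (fun x => g (x + 1))]
    simp

lemma alt_eq_tgt (matrix : List (List Int)) :
    minus_triangular_lower_alt matrix = pvTgt matrix := by
  match matrix with
  | [] => simp [minus_triangular_lower_alt, pvTgt]
  | r0 :: rest =>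
    have ih := alt_eq_tgt (rest.map (fun row => PySem.List.slice row (some 1) none))
    rw [minus_triangular_lower_alt, ih]
    unfold pvTgt
    simp only [List.length_map, List.length_cons]
    rw [zipWith_map_range _ ([] : List Int), List.range_succ_eq_map, List.map_cons, List.map_map]
    congr 1
    · simp [PySem.List.pyGetD_zero, List.range_one]
    · apply List.map_congr_left
      intro x hx
      rw [List.mem_range] at hx
      simp only [Function.comp]
      have hrow : ((rest.map (fun row => PySem.List.slice row (some 1) none)).getD x []) =
          (rest.getD x []).tail := by
        have h : rest[x]? = some rest[x] := List.getElem?_eq_getElem hx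
        simp [List.getD_eq_getElem?_getD, h, PySem.List.slice_from_one]
      rw [hrow]
      simp only [List.getD_cons_succ, Nat.succ_eq_add_one]
      rw [List.range_succ_eq_map (n := x + 1), List.map_cons, List.cons_append, List.map_map]
      congr 1
      · simp [PySem.List.pyGetD_zero]
      · congr 1
        · apply List.map_congr_left
          intro y _
          simp [Function.comp, Nat.succ_eq_add_one]
        · congr 1
          omega
termination_by matrix.length
decreasing_by simp

lemma row_eq (matrix : List (List Int)) (x : Int)
    (hx0 : 0 ≤ x) (hxn : x < (matrix.length : Int)) :
    (PySem.List.pyRange 0 matrix.length 1).foldl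
      (fun row y =>
        if x ≥ y then
          row ++ [-(PySem.List.pyGetD (PySem.List.pyGetD matrix x []) y 0)]
        else
          row ++ [(0 : Int)]) []
    =
    ((PySem.List.pyRange 0 (x + 1) 1).map
        (fun y => -(PySem.List.pyGetD (PySem.List.pyGetD matrix x []) y 0)))
      ++ List.replicate (matrix.length - x.toNat - 1) (0 : Int) := by
  have hbody :
      (fun (row : List Int) (y : Int) =>
        if x ≥ y then
          row ++ [-(PySem.List.pyGetD (PySem.List.pyGetD matrix x []) y 0)]
        else
          row ++ [(0 : Int)])
      = (fun row y =>
          row ++ [if x ≥ y then -(PySem.List.pyGetD (PySem.List.pyGetD matrix x []) y 0) else 0]) := by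
    funext row y
    by_cases h : x ≥ y <;> simp [h]
  rw [hbody, PySem.List.foldl_append_singleton_eq_map, List.nil_append,
      PySem.List.pyRange_one_append 0 (x + 1) (matrix.length : Int) (by omega) (by omega),
      List.map_append]
  congr 1
  · apply List.map_congr_left
    intro y hy
    rw [PySem.List.mem_pyRange_one] at hy
    simp [show x ≥ y by omega]
  · have : ∀ y ∈ PySem.List.pyRange (x + 1) (matrix.length : Int) 1,
        (if x ≥ y then -(PySem.List.pyGetD (PySem.List.pyGetD matrix x []) y 0) else (0 : Int)) = 0 := by
      intro y hy
      rw [PySem.List.mem_pyRange_one] at hy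
      simp [show ¬ x ≥ y by omega]
    rw [List.map_congr_left this, List.map_const', PySem.List.length_pyRange_one]
    congr 1
    omega

lemma a_eq_tgt (matrix : List (List Int)) :
    minus_triangular_lower matrix = pvTgt matrix := by
  unfold minus_triangular_lower
  rw [PySem.List.foldl_append_singleton_eq_map, List.nil_append]
  have h1 := List.map_congr_left (l := PySem.List.pyRange 0 (matrix.length : Int) 1)
    (fun x hx => row_eq matrix x
      ((PySem.List.mem_pyRange_one.mp hx).1) ((PySem.List.mem_pyRange_one.mp hx).2))
  rw [h1]
  unfold pvTgt
  rw [PySem.List.pyRange_one 0 (matrix.length : Int)]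
  simp only [Int.sub_zero, Int.toNat_natCast, List.map_map]
  apply List.map_congr_left
  intro x hx
  rw [List.mem_range] at hx
  simp only [Function.comp, Int.zero_add]
  rw [PySem.List.pyRange_one 0 ((x : Int) + 1)]
  simp only [Int.sub_zero, List.map_map]
  congr 1
  have : ((x : Int) + 1).toNat = x + 1 := by omega
  rw [this]
  apply List.map_congr_left
  intro y hy
  rw [List.mem_range] at hy
  simp [Function.comp, PySem.List.pyGetD_natCast]

-- ===== VERDICT (by name: the statement is the Claim_ definition above) =====
theorem minus_triangular_lower_spec : Claim_equal_minus_triangular_lower := by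
  intro matrix _ _
  unfold Spec_minus_triangular_lower
  rw [a_eq_tgt, alt_eq_tgt]
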